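-- pv_equiv track=rewrite | github.com/nkvamaks/oligoshell_calc | oligocalc/utils.py | sequence2tuple
-- ===== SOURCE A (Python) =====
-- def sequence2tuple(sequence):
--     """The function takes a sequence as a string and converts it into a tuple:
--         e.g. NN[6FAM]AACTNRG[BHQ1dT]TTACGTC[DABCYL]TT is converted to
--         ('N','N','[6FAM], ... ,'[DABCYL]','T','T')
--         """
--     sequence_tuple = ()
--     mod_str = ''
--     mod = False
--
--     for nt in sequence:
--         if nt == '[' or mod is True:
--             mod = True
--             if nt !=' ':
--                 mod_str += nt
--             if nt == ']':
--                 sequence_tuple += (mod_str,)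
--                 mod = False
--                 mod_str = ''
--             continue
--         if nt != ' ':
--             sequence_tuple += (nt,)
--     return sequence_tuple
-- ===== SOURCE B (Python) =====
-- def sequence2tuple(sequence):
--     """Index-based tokenizer: on '[' jump to the matching first ']' with str.find
--     and take the whole bracket (spaces removed) as one token; other non-space
--     chars are single tokens; an unterminated '[' drops the rest."""
--     tokens = []
--     i = 0
--     n = len(sequence)
--     while i < n:
--         ch = sequence[i]
--         if ch == '[':
--             j = sequence.find(']', i)
--             if j == -1:
--                 break
--             tokens.append(sequence[i:j + 1].replace(' ', ''))
--             i = j + 1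
--         else:
--             if ch != ' ':
--                 tokens.append(ch)
--             i += 1
--     return tuple(tokens)
-- ===== Notes on version B (the rewrite author's own statement) =====
-- stated objective: faster
-- what changed: Replaced A's per-character state machine (mod flag + growing mod_str, quadratic tuple += appends) with an index-based tokenizer that, on '[', jumps directly to the first ']' via str.find and emits the whole bracket slice (spaces removed) as one token, collecting tokens in a list.
import Mathlib
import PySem

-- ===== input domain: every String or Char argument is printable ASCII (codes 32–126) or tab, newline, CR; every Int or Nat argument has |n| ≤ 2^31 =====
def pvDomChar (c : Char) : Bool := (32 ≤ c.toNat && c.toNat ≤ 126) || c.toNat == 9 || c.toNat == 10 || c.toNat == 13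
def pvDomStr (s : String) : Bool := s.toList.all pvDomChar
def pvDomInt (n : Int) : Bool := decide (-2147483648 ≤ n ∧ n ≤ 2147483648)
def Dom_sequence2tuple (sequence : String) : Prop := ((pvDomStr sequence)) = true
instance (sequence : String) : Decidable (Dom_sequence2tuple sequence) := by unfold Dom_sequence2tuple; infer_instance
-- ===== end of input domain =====

-- B replaces A's per-char mod-flag state machine by an index/find-based tokenizer
-- that jumps over each bracketed modification in one step (objective: alternative).


-- ===== PORT A =====
-- A's loop: state (sequence_tuple, mod_str, mod); structural recursion over the chars.
def seqGoA : List Char → List String → List Char → Bool → List String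
  | [], acc, _, _ => acc
  | nt :: rest, acc, modStr, mod =>
    if nt = '[' ∨ mod = true then
      let modStr' := if nt ≠ ' ' then modStr ++ [nt] else modStr
      if nt = ']' then seqGoA rest (acc ++ [String.mk modStr']) [] false
      else seqGoA rest acc modStr' true
    else
      if nt ≠ ' ' then seqGoA rest (acc ++ [String.mk [nt]]) modStr mod
      else seqGoA rest acc modStr mod

def sequence2tuple (sequence : String) : List String :=
  seqGoA sequence.toList [] [] false

-- ===== PORT B =====
-- Source B's while loop over positions; sequence.find(']', i) becomes findIdx? on the
-- remaining chars (j = i + 1 + k), the slice sequence[i:j+1] becomes '[' :: take (k+1),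
-- and .replace(' ', '') becomes filter (· ≠ ' ').
def seqGoB : List Char → List String
  | [] => []
  | c :: rest =>
    if c = '[' then
      match rest.findIdx? (· = ']') with
      | none => []
      | some k =>
          String.mk (('[' :: rest.take (k + 1)).filter (· ≠ ' ')) :: seqGoB (rest.drop (k + 1))
    else if c = ' ' then seqGoB rest
    else String.mk [c] :: seqGoB rest
termination_by cs => cs.length
decreasing_by all_goals (simp; try omega)

def sequence2tuple_alt (sequence : String) : List String :=
  seqGoB sequence.toList

-- ===== PRECONDITION & SPEC =====
def Spec_sequence2tuple (sequence : String) (out : List String) : Prop := out = sequence2tuple_alt sequence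
instance (sequence : String) (out : List String) : Decidable (Spec_sequence2tuple sequence out) := by unfold Spec_sequence2tuple; infer_instance

-- ===== CLAIM (what is proved, stated in full; the proofs are below) =====
def Claim_equal_sequence2tuple : Prop := ∀ (sequence : String), Dom_sequence2tuple sequence → Spec_sequence2tuple sequence (sequence2tuple sequence)

-- ===== LEMMAS AND PROOFS =====

-- A's loop in bracket mode (mod = true) consumes chars up to and including the first ']',
-- appending the non-space ones to mod_str, then emits the token and resumes in normal mode.
theorem seqGoA_bracket (cs : List Char) : ∀ (acc : List String) (m : List Char),
    seqGoA cs acc m true =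
      match cs.findIdx? (· = ']') with
      | none => acc
      | some k =>
          seqGoA (cs.drop (k + 1))
            (acc ++ [String.mk (m ++ (cs.take (k + 1)).filter (· ≠ ' '))]) [] false := by
  induction cs with
  | nil => intro acc m; simp [seqGoA]
  | cons c rest ih =>
    intro acc m
    by_cases hc : c = ']'
    · subst hc
      simp [seqGoA, List.findIdx?_cons]
    · simp only [seqGoA, or_true, if_pos, List.findIdx?_cons, hc, decide_false,
        Bool.false_eq_true, if_false]
      rw [ih]
      by_cases hsp : c = ' '
      · subst hsp
        cases hfind : rest.findIdx? (· = ']') with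
        | none => simp
        | some k => simp [List.take_succ_cons]
      · cases hfind : rest.findIdx? (· = ']') with
        | none => simp
        | some k =>
          simp [hsp, List.take_succ_cons]

-- Main invariant: A's loop from the normal state appends exactly B's tokenization.
theorem seqGoA_normal : ∀ (n : Nat) (cs : List Char), cs.length ≤ n → ∀ (acc : List String),
    seqGoA cs acc [] false = acc ++ seqGoB cs := by
  intro n
  induction n with
  | zero =>
    intro cs hlen acc
    have : cs = [] := List.eq_nil_of_length_eq_zero (Nat.le_zero.mp hlen)
    subst this; simp [seqGoA, seqGoB]
  | succ n ih =>
    intro cs hlen acc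
    cases cs with
    | nil => simp [seqGoA, seqGoB]
    | cons c rest =>
      by_cases hb : c = '['
      · subst hb
        have h1 : seqGoA ('[' :: rest) acc [] false = seqGoA rest acc ['['] true := by
          simp [seqGoA]
        rw [h1, seqGoA_bracket]
        cases hfind : rest.findIdx? (· = ']') with
        | none => simp [seqGoB, hfind]
        | some k =>
          have hdrop : (rest.drop (k + 1)).length ≤ n := by
            simp at hlen ⊢; omega
          change seqGoA (rest.drop (k + 1))
              (acc ++ [String.mk (['['] ++ (rest.take (k + 1)).filter (· ≠ ' '))]) [] false =
              acc ++ seqGoB ('[' :: rest)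
          rw [ih _ hdrop]
          simp [seqGoB, hfind, List.append_assoc]
      · by_cases hsp : c = ' '
        · subst hsp
          have h1 : seqGoA (' ' :: rest) acc [] false = seqGoA rest acc [] false := by
            simp [seqGoA]
          rw [h1, ih rest (by simp at hlen; omega)]
          simp [seqGoB]
        · have h1 : seqGoA (c :: rest) acc [] false =
              seqGoA rest (acc ++ [String.mk [c]]) [] false := by
            simp [seqGoA, hb, hsp]
          rw [h1, ih rest (by simp at hlen; omega)]
          simp [seqGoB, hb, hsp]

-- ===== VERDICT (by name: the statement is the Claim_ definition above) =====
theorem sequence2tuple_spec : Claim_equal_sequence2tuple := by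
  intro sequence _
  unfold Spec_sequence2tuple sequence2tuple sequence2tuple_alt
  simpa using seqGoA_normal sequence.toList.length sequence.toList le_rfl []
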